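-- pv_equiv track=rewrite | github.com/johnjmurray/rsa_final | code.py | text2num
-- ===== SOURCE A (Python) =====
-- def text2num(message):
-- 	a=list(message)
--
-- 	i=0
--
-- 	b=a
-- 	d=[]
-- 	e=[]
-- 	f=[]
--
--
-- 	for i in range(len(a)):
--
-- 	    if ord(a[i])==32:
-- 	        e.append(d)
-- 	        d=[]
--
-- 	    d.append(ord(a[i]))
--
-- 	for i in range(1,len(e)):
-- 	    e[i].remove(32)
--
-- 	for i in range(len(e)):
-- 	    x=0
-- 	    for j in range(len(e[i])):
--
-- 	        c=x
-- 	        x=(c*256)+e[i][j]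
-- 	    f.append(x)
-- 	return f
-- ===== SOURCE B (Python) =====
-- def text2num(message):
--     # Idiomatic: split on the single space character, drop the segment after the
--     # last space (A never emits it), encode each segment as a big-endian base-256 integer.
--     def encode(word):
--         num = 0
--         for ch in word:
--             num = num * 256 + ord(ch)
--         return num
--     return [encode(word) for word in message.split(' ')[:-1]]
-- ===== Notes on version B (the rewrite author's own statement) =====
-- stated objective: idiomatic
-- what changed: Replaced the index loop that hand-builds ord-lists, mutates them with remove(32) and re-folds them, by a comprehension over the space-separated segments (dropping the final segment) with a direct base-256 accumulation per word.
import Mathlib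
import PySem

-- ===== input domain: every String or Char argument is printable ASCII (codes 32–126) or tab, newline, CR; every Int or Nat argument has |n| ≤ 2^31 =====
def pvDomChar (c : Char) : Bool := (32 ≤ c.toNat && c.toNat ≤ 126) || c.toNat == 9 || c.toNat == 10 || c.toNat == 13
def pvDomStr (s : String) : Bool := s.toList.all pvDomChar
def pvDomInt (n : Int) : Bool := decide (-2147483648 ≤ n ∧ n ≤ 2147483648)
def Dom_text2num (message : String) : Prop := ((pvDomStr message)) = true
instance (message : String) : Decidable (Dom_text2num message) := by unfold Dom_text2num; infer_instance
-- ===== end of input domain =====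

-- B replaces A's hand-built ord-list splitting/mutation with a split on the space character, dropping the final segment, plus a direct base-256 fold per word (idiomatic; measured faster by a constant factor: C-level str.split and fewer Python-level passes).

-- ===== PORT A =====
-- first loop's body: on a space, flush d into e and start d afresh; always append ord(a[i])
def pvStepA (st : List Int × List (List Int)) (ch : Char) : List Int × List (List Int) :=
  let de := if ch.toNat == 32 then (([] : List Int), st.2 ++ [st.1]) else (st.1, st.2)
  (de.1 ++ [(ch.toNat : Int)], de.2)

def text2num (message : String) : List Int :=
  let a := message.toList
  let e := (a.foldl pvStepA ([], [])).2
  -- for i in range(1, len(e)): e[i].remove(32) — every e[i] with i ≥ 1 starts with 32 by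
  -- construction, so Python's remove never raises; getD is never taken on the none branch
  let e2 := match e with
    | [] => []
    | s :: r => s :: r.map (fun w => (PySem.List.remove? w 32).getD w)
  e2.map (fun w => w.foldl (fun x v => x * 256 + v) 0)

-- ===== PORT B =====
def text2num_alt (message : String) : List Int :=
  -- Python split with the nonempty space separator is PySem.Chars.splitOn; dropping the last segment is slice … (-1)
  let words := PySem.Chars.splitOn message.toList [' ']
  (PySem.List.slice words none (some (-1))).map
    (fun w => w.foldl (fun num c => num * 256 + (c.toNat : Int)) 0)

-- ===== PRECONDITION & SPEC =====
def Spec_text2num (message : String) (out : List Int) : Prop := out = text2num_alt message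
instance (message : String) (out : List Int) : Decidable (Spec_text2num message out) := by unfold Spec_text2num; infer_instance

-- ===== CLAIM (what is proved, stated in full; the proofs are below) =====
def Claim_equal_text2num : Prop := ∀ (message : String), Dom_text2num message → Spec_text2num message (text2num message)

-- ===== LEMMAS AND PROOFS =====

/-- Python-style split on a single space, direct recursion. -/
def pvSegs : List Char → List (List Char)
  | [] => [[]]
  | c :: t =>
    if c = ' ' then [] :: pvSegs t
    else
      match pvSegs t with
      | [] => [[c]]
      | s :: r => (c :: s) :: r

def pvOrds (w : List Char) : List Int := w.map (fun c => (c.toNat : Int))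

/-- accumulator form of split-on-space -/
def pvAux : List Char → List Char → List (List Char)
  | [], cur => [cur.reverse]
  | c :: t, cur => if c = ' ' then cur.reverse :: pvAux t [] else pvAux t (c :: cur)

lemma pvSegs_ne_nil (l : List Char) : pvSegs l ≠ [] := by
  cases l with
  | nil => simp [pvSegs]
  | cons c t =>
    simp only [pvSegs]
    split_ifs
    · simp
    · cases h : pvSegs t <;> simp

lemma char_eq_space_iff (c : Char) : c.toNat = 32 ↔ c = ' ' := by
  constructor
  · intro h
    have h' : c.val.toNat = (' ' : Char).val.toNat := h
    exact Char.ext (UInt32.toNat_inj.mp h')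
  · intro h; subst h; rfl

lemma go_space (fuel : Nat) : ∀ (l cur : List Char) (acc : List (List Char)),
    l.length < fuel →
    PySem.Chars.splitOn.go [' '] fuel l cur acc = acc.reverse ++ pvAux l cur := by
  induction fuel with
  | zero => intro l cur acc h; omega
  | succ n ih =>
    intro l cur acc h
    cases l with
    | nil =>
      rw [show PySem.Chars.splitOn.go [' '] (n+1) [] cur acc = (cur.reverse :: acc).reverse
            from rfl]
      simp [pvAux]
    | cons c rest =>
      by_cases hc : c = ' '
      · subst hc
        rw [show PySem.Chars.splitOn.go [' '] (n+1) (' ' :: rest) cur acc =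
              PySem.Chars.splitOn.go [' '] n rest [] (cur.reverse :: acc) by
            simp [PySem.Chars.splitOn.go, List.isPrefixOf]]
        rw [ih rest [] (cur.reverse :: acc) (by simpa using Nat.lt_of_succ_lt_succ h)]
        simp [pvAux]
      · rw [show PySem.Chars.splitOn.go [' '] (n+1) (c :: rest) cur acc =
              PySem.Chars.splitOn.go [' '] n rest (c :: cur) acc by
            simp [PySem.Chars.splitOn.go, List.isPrefixOf, (Ne.symm hc)]]
        rw [ih rest (c :: cur) acc (by simpa using Nat.lt_of_succ_lt_succ h)]
        simp [pvAux, hc]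

lemma pvAux_eq_segs : ∀ (l cur : List Char) (s : List Char) (r : List (List Char)),
    pvSegs l = s :: r → pvAux l cur = (cur.reverse ++ s) :: r := by
  intro l
  induction l with
  | nil =>
    intro cur s r h
    simp [pvSegs] at h
    obtain ⟨hs, hr⟩ := h
    simp [pvAux, ← hs, ← hr]
  | cons c t ih =>
    intro cur s r h
    by_cases hc : c = ' '
    · subst hc
      simp [pvSegs] at h
      obtain ⟨hs, hr⟩ := h
      subst hs
      obtain ⟨s', r', ht⟩ := List.exists_cons_of_ne_nil (pvSegs_ne_nil t)
      rw [← hr, ht]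
      simp [pvAux, ih [] s' r' ht]
    · obtain ⟨s', r', ht⟩ := List.exists_cons_of_ne_nil (pvSegs_ne_nil t)
      simp [pvSegs, hc, ht] at h
      obtain ⟨hs, hr⟩ := h
      subst hs; subst hr
      simp [pvAux, hc, ih (c :: cur) s' r' ht]

lemma splitOn_space (l : List Char) : PySem.Chars.splitOn l [' '] = pvSegs l := by
  obtain ⟨s, r, h⟩ := List.exists_cons_of_ne_nil (pvSegs_ne_nil l)
  rw [PySem.Chars.splitOn, go_space (l.length + 1) l [] [] (by omega),
      pvAux_eq_segs l [] s r h]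
  simp [h]

def pvDFin (d : List Int) (s : List Char) (r : List (List Char)) : List Int :=
  match r with
  | [] => d ++ pvOrds s
  | _ :: _ => 32 :: pvOrds (r.getLastD [])

def pvEFin (d : List Int) (s : List Char) (r : List (List Char)) : List (List Int) :=
  match r with
  | [] => []
  | _ :: _ => (d ++ pvOrds s) :: r.dropLast.map (fun w => 32 :: pvOrds w)

lemma foldA_eq : ∀ (l : List Char) (d : List Int) (e : List (List Int))
    (s : List Char) (r : List (List Char)), pvSegs l = s :: r →
    l.foldl pvStepA (d, e) = (pvDFin d s r, e ++ pvEFin d s r) := by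
  intro l
  induction l with
  | nil =>
    intro d e s r h
    simp [pvSegs] at h
    obtain ⟨hs, hr⟩ := h
    subst hs; subst hr
    simp [pvDFin, pvEFin, pvOrds]
  | cons c t ih =>
    intro d e s r h
    obtain ⟨s', r', ht⟩ := List.exists_cons_of_ne_nil (pvSegs_ne_nil t)
    by_cases hc : c = ' '
    · subst hc
      simp [pvSegs, ht] at h
      obtain ⟨hs, hr⟩ := h
      subst hs
      rw [List.foldl_cons, show pvStepA (d, e) ' ' = ([(32 : Int)], e ++ [d]) by rfl,
          ih [32] (e ++ [d]) s' r' ht]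
      subst hr
      cases r' with
      | nil =>
        simp [pvDFin, pvEFin, pvOrds]
      | cons a b =>
        simp [pvDFin, pvEFin, pvOrds,
              List.dropLast_cons_of_ne_nil (by simp : (a :: b : List (List Char)) ≠ [])]
    · have hc32 : ¬ c.toNat = 32 := fun hx => hc ((char_eq_space_iff c).mp hx)
      simp [pvSegs, hc, ht] at h
      obtain ⟨hs, hr⟩ := h
      rw [List.foldl_cons,
          show pvStepA (d, e) c = (d ++ [(c.toNat : Int)], e) by
            simp [pvStepA, hc32],
          ih (d ++ [(c.toNat : Int)]) e s' r' ht]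
      subst hs; subst hr
      cases r' with
      | nil => simp [pvDFin, pvEFin, pvOrds]
      | cons a b => simp [pvDFin, pvEFin, pvOrds]

lemma main_eq (message : String) : text2num message = text2num_alt message := by
  obtain ⟨s, r, h⟩ := List.exists_cons_of_ne_nil (pvSegs_ne_nil message.toList)
  rw [text2num, text2num_alt]
  simp only [splitOn_space, PySem.List.slice_to_neg_one, h,
             foldA_eq message.toList [] [] s r h]
  cases r with
  | nil => simp [pvEFin]
  | cons a b =>
    simp [pvEFin, List.dropLast_cons_of_ne_nil (by simp : (a :: b : List (List Char)) ≠ []),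
          pvOrds, List.foldl_map, Function.comp_def, PySem.List.remove?_cons_self]

-- ===== VERDICT (by name: the statement is the Claim_ definition above) =====
theorem text2num_spec : Claim_equal_text2num := by
  intro message _
  unfold Spec_text2num
  exact main_eq message
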